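-- pv_equiv track=rewrite | github.com/vishnumur777/Dsacodingninjas | Arrays/stalinsort.py | stalinsort
-- ===== SOURCE A (Python) =====
-- def stalinsort(arr,n):
--     shoot = []
--     for i in range(n-1):
--         if arr[i+1] < arr[i]:
--             shoot.append(arr[i+1])
--
--     for i in shoot:
--         arr.pop(arr.index(i))
--
--     return arr
-- ===== SOURCE B (Python) =====
-- def stalinsort(arr, n):
--     # one pass: how many first-occurrences of each value must be removed
--     cnt = {}
--     for i in range(n - 1):
--         if arr[i + 1] < arr[i]:
--             cnt[arr[i + 1]] = cnt.get(arr[i + 1], 0) + 1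
--     # one pass: skip the first cnt[v] occurrences of each value v
--     out = []
--     for x in arr:
--         c = cnt.get(x, 0)
--         if c > 0:
--             cnt[x] = c - 1
--         else:
--             out.append(x)
--     return out
-- ===== Notes on version B (the rewrite author's own statement) =====
-- stated objective: alternative
-- what changed: Replaces the second loop's repeated list.index + pop per flagged value by a removal-count dictionary built in one pass and a single output pass that skips the first k occurrences of each value.
import Mathlib
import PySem

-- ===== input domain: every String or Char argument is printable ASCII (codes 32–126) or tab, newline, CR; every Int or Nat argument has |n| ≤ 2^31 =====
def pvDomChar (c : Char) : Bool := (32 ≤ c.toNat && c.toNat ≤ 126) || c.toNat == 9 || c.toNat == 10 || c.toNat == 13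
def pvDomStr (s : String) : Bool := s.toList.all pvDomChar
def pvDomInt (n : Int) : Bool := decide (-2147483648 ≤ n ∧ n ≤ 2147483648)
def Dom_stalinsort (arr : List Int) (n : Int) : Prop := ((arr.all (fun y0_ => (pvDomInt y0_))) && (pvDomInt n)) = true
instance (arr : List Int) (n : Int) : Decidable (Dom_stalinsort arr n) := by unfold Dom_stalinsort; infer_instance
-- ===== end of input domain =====

-- B replaces A's repeated index/pop removal loop by a removal-count dict and one skipping pass;
-- A mutates arr in place while B builds a fresh list — the equivalence proved is about the RETURN value only.

-- ===== PORT A =====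
-- arr.pop(arr.index(v)): remove the first occurrence of v (the none branches mirror where Python raises; excluded by Pre_)
def rmFirst (a : List Int) (v : Int) : List Int :=
  match PySem.List.index? a v with
  | some j =>
    match PySem.List.pop? a (j : Int) with
    | some r => r.2
    | none => a
  | none => a

-- loop body of 'for i in range(n-1): if arr[i+1] < arr[i]: shoot.append(arr[i+1])'
def shootStep (arr : List Int) (s : List Int) (i : Int) : List Int :=
  match PySem.List.pyGet? arr (i + 1), PySem.List.pyGet? arr i with
  | some a1, some a0 => if a1 < a0 then s ++ [a1] else s
  | _, _ => s

def stalinsort (arr : List Int) (n : Int) : List Int :=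
  let shoot := (PySem.List.pyRange 0 (n - 1) 1).foldl (shootStep arr) []
  shoot.foldl rmFirst arr

-- ===== PORT B =====
-- loop body of the counting pass: cnt[arr[i+1]] = cnt.get(arr[i+1], 0) + 1 on a descent
def cntStep (arr : List Int) (d : PySem.Dict Int Int) (i : Int) : PySem.Dict Int Int :=
  match PySem.List.pyGet? arr (i + 1), PySem.List.pyGet? arr i with
  | some a1, some a0 => if a1 < a0 then d.insert a1 (d.getD a1 0 + 1) else d
  | _, _ => d

-- loop body of the output pass: skip x (decrement) while cnt.get(x, 0) > 0, else append
def passStep (st : List Int × PySem.Dict Int Int) (x : Int) : List Int × PySem.Dict Int Int :=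
  let c := st.2.getD x 0
  if c > 0 then (st.1, st.2.insert x (c - 1)) else (st.1 ++ [x], st.2)

def stalinsort_alt (arr : List Int) (n : Int) : List Int :=
  let cnt := (PySem.List.pyRange 0 (n - 1) 1).foldl (cntStep arr) PySem.Dict.empty
  (arr.foldl passStep ([], cnt)).1

-- ===== PRECONDITION & SPEC =====
-- Pre_ excludes exactly the inputs where Python A raises IndexError: n exceeding len(arr)
def Pre_stalinsort (arr : List Int) (n : Int) : Prop := n ≤ (arr.length : Int)
instance (arr : List Int) (n : Int) : Decidable (Pre_stalinsort arr n) := by unfold Pre_stalinsort; infer_instance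
def pvWitness_stalinsort : List Int × Int := ([3, 1, 4, 2], 4)
def Spec_stalinsort (arr : List Int) (n : Int) (out : List Int) : Prop := out = stalinsort_alt arr n
instance (arr : List Int) (n : Int) (out : List Int) : Decidable (Spec_stalinsort arr n out) := by unfold Spec_stalinsort; infer_instance

-- ===== CLAIM (what is proved, stated in full; the proofs are below) =====
def Claim_equal_stalinsort : Prop := ∀ (arr : List Int) (n : Int), Dom_stalinsort arr n → Pre_stalinsort arr n → Spec_stalinsort arr n (stalinsort arr n)

-- ===== LEMMAS AND PROOFS =====

-- removal-by-counter reference function: skip the first (c v) occurrences of each v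
def skipF : List Int → (Int → Int) → List Int
  | [], _ => []
  | x :: xs, c => if c x > 0 then skipF xs (fun v => if v = x then c x - 1 else c v) else x :: skipF xs c

theorem rmFirst_nil (v : Int) : rmFirst [] v = [] := by
  simp [rmFirst, PySem.List.index?]

theorem rmFirst_cons_self (x : Int) (xs : List Int) : rmFirst (x :: xs) x = xs := by
  unfold rmFirst
  rw [PySem.List.index?_cons_self]
  simp [PySem.List.pop?_zero_cons]

theorem rmFirst_cons_ne (x v : Int) (xs : List Int) (h : x ≠ v) :
    rmFirst (x :: xs) v = x :: rmFirst xs v := by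
  unfold rmFirst
  rw [PySem.List.index?_cons_of_ne xs h]
  cases hj : PySem.List.index? xs v with
  | none => simp
  | some j =>
    have hlt : j < xs.length := by
      rw [PySem.List.index?_eq_idxOf?] at hj
      have := List.findIdx?_eq_some_iff_findIdx_eq.mp hj
      omega
    simp only [Option.map_some]
    rw [PySem.List.pop?_natCast (x :: xs) (j + 1) (by simp; omega),
      PySem.List.pop?_natCast xs j hlt]
    simp

theorem foldl_rmFirst_nil (shoot : List Int) : shoot.foldl rmFirst [] = [] := by
  induction shoot with
  | nil => rfl
  | cons v rest ih => simp [rmFirst_nil, ih]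

theorem foldl_rmFirst_not_mem (shoot : List Int) (x : Int) (xs : List Int) (h : x ∉ shoot) :
    shoot.foldl rmFirst (x :: xs) = x :: shoot.foldl rmFirst xs := by
  induction shoot generalizing xs with
  | nil => rfl
  | cons v rest ih =>
    have hvx : v ≠ x := fun he => h (he ▸ List.mem_cons_self)
    have hx : x ∉ rest := fun hm => h (List.mem_cons_of_mem _ hm)
    simp only [List.foldl_cons]
    rw [rmFirst_cons_ne x v xs (Ne.symm hvx), ih _ hx]

theorem foldl_rmFirst_mem (shoot : List Int) (x : Int) (xs : List Int) (h : x ∈ shoot) :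
    shoot.foldl rmFirst (x :: xs) = (shoot.erase x).foldl rmFirst xs := by
  induction shoot generalizing xs with
  | nil => cases h
  | cons v rest ih =>
    by_cases hvx : v = x
    · subst hvx
      simp only [List.foldl_cons, rmFirst_cons_self, List.erase_cons_head]
    · have hx : x ∈ rest := by
        cases List.mem_cons.mp h with
        | inl he => exact absurd he.symm hvx
        | inr hm => exact hm
      simp only [List.foldl_cons]
      rw [rmFirst_cons_ne x v xs (Ne.symm hvx), ih _ hx,
        List.erase_cons_tail (by simpa using hvx)]
      simp

-- A's removal loop computes exactly the counter-skip of arr by shoot's multiplicities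
theorem foldl_rmFirst_eq_skipF (arr : List Int) :
    ∀ shoot : List Int, shoot.foldl rmFirst arr = skipF arr (fun v => (shoot.count v : Int)) := by
  induction arr with
  | nil => intro shoot; rw [foldl_rmFirst_nil]; rfl
  | cons x xs ih =>
    intro shoot
    by_cases hx : x ∈ shoot
    · rw [foldl_rmFirst_mem _ _ _ hx, ih]
      have hpos : 0 < shoot.count x := List.count_pos_iff.mpr hx
      have : skipF (x :: xs) (fun v => (shoot.count v : Int))
          = skipF xs (fun v => if v = x then (shoot.count x : Int) - 1 else (shoot.count v : Int)) := by
        simp only [skipF]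
        rw [if_pos (by exact_mod_cast hpos)]
      rw [this]
      congr 1
      funext v
      rw [List.count_erase]
      by_cases hv : v = x
      · subst hv
        rw [if_pos (by simp), if_pos rfl, Nat.cast_sub hpos]
        norm_num
      · rw [if_neg (by simpa using fun he => hv he.symm), if_neg hv, Nat.sub_zero]
    · rw [foldl_rmFirst_not_mem _ _ _ hx, ih]
      have hz : shoot.count x = 0 := List.count_eq_zero.mpr hx
      simp only [skipF]
      rw [if_neg (by simp [hz])]

-- B's counting pass tracks the multiset of A's shoot list
theorem cnt_inv (arr : List Int) (l : List Int) :
    ∀ (s : List Int) (d : PySem.Dict Int Int),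
      (∀ v, d.getD v 0 = (s.count v : Int)) →
      ∀ v, (l.foldl (cntStep arr) d).getD v 0 = ((l.foldl (shootStep arr) s).count v : Int) := by
  induction l with
  | nil => intro s d h v; exact h v
  | cons i rest ih =>
    intro s d h v
    simp only [List.foldl_cons]
    apply ih
    intro w
    unfold cntStep shootStep
    cases h1 : PySem.List.pyGet? arr (i + 1) with
    | none => simpa using h w
    | some a1 =>
      cases h0 : PySem.List.pyGet? arr i with
      | none => simpa using h w
      | some a0 =>
        by_cases hlt : a1 < a0
        · simp only [if_pos hlt]
          rw [PySem.Dict.getD_insert, List.count_append, List.count_singleton]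
          by_cases hw : w = a1
          · subst hw
            rw [if_pos rfl, if_pos (by simp), h w]
            push_cast; ring
          · rw [if_neg hw, if_neg (by simpa using fun he => hw he.symm), Nat.add_zero, h w]
        · simpa [if_neg hlt] using h w

-- B's output pass is the counter-skip of arr by the dict's counts
theorem passB (arr : List Int) :
    ∀ (out : List Int) (d : PySem.Dict Int Int),
      (arr.foldl passStep (out, d)).1 = out ++ skipF arr (fun v => d.getD v 0) := by
  induction arr with
  | nil => intro out d; simp [skipF]
  | cons x xs ih =>
    intro out d
    simp only [List.foldl_cons]
    by_cases hc : d.getD x 0 > 0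
    · have hstep : passStep (out, d) x = (out, d.insert x (d.getD x 0 - 1)) := by
        simp [passStep, hc]
      rw [hstep, ih]
      have : skipF (x :: xs) (fun v => d.getD v 0)
          = skipF xs (fun v => if v = x then d.getD x 0 - 1 else d.getD v 0) := by
        simp only [skipF]; rw [if_pos hc]
      rw [this]
      exact congrArg (out ++ skipF xs ·) (funext fun v => PySem.Dict.getD_insert d x v (d.getD x 0 - 1) 0)
    · have hstep : passStep (out, d) x = (out ++ [x], d) := by
        simp [passStep, hc]
      rw [hstep, ih]
      have : skipF (x :: xs) (fun v => d.getD v 0) = x :: skipF xs (fun v => d.getD v 0) := by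
        simp only [skipF]; rw [if_neg hc]
      rw [this]
      simp

theorem getD_empty (v : Int) : (PySem.Dict.empty : PySem.Dict Int Int).getD v 0 = 0 := by
  rfl

-- ===== VERDICT (by name: the statement is the Claim_ definition above) =====
theorem stalinsort_spec : Claim_equal_stalinsort := by
  intro arr n _ _
  unfold Spec_stalinsort stalinsort stalinsort_alt
  rw [foldl_rmFirst_eq_skipF, passB]
  simp only [List.nil_append]
  congr 1
  funext v
  exact (cnt_inv arr _ [] PySem.Dict.empty (fun w => by rw [getD_empty]; simp) v).symm
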